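-- pv_equiv track=rewrite | github.com/debdattasarkar/DSA | 2. GFG/0. All/2. Strings/(M) Min Add to Make Parentheses Valid/py_sol.py | minParentheses
-- ===== SOURCE A (Python) =====
-- def minParentheses(s):
--     """
--     Single pass counter.
--     Time  : O(n)  (one scan)
--     Space : O(1)  (two integers)
--     """
--     balance = 0  # unmatched '('
--     need = 0     # number of '(' we must insert for unmatched ')'
--     for ch in s:
--         if ch == '(':
--             balance += 1
--         else:  # ch == ')'
--             if balance > 0:
--                 balance -= 1
--             else:
--                 need += 1
--     # 'need' covers extra ')', 'balance' covers extra '('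
--     return need + balance
-- ===== SOURCE B (Python) =====
-- def minParentheses(s):
--     """Running balance with minimum tracking: return r - 2*min_prefix."""
--     r = 0
--     m = 0
--     for ch in s:
--         r = r + 1 if ch == '(' else r - 1
--         if r < m:
--             m = r
--     return r - 2 * m
-- ===== Notes on version B (the rewrite author's own statement) =====
-- stated objective: alternative
-- what changed: Replaces the two-counter loop with an inner conditional by a single signed running balance whose minimum prefix value m is tracked; the answer is the closed form r - 2*m.
import Mathlib
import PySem

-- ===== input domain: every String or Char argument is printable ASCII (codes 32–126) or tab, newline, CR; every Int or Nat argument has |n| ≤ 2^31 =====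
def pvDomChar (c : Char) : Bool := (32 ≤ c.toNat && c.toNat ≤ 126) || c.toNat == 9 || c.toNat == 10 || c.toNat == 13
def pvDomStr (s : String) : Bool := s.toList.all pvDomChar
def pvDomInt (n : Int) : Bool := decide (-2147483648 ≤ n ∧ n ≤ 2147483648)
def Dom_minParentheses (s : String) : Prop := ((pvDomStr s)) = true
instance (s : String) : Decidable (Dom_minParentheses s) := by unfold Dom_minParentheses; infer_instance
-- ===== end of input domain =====

-- B replaces A's two-counter loop (balance/need with an inner conditional) by a single signed
-- running balance whose minimum prefix value is tracked; answer = r - 2*m (alternative decomposition, same O(n) cost).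


-- ===== PORT A =====
def minParenthesesLoopA : List Char → Int → Int → Int × Int
  | [], balance, need => (balance, need)
  | ch :: rest, balance, need =>
    if ch = '(' then minParenthesesLoopA rest (balance + 1) need
    else if balance > 0 then minParenthesesLoopA rest (balance - 1) need
    else minParenthesesLoopA rest balance (need + 1)

def minParentheses (s : String) : Int :=
  let (balance, need) := minParenthesesLoopA s.toList 0 0
  need + balance

-- ===== PORT B =====
def minParenthesesLoopB : List Char → Int → Int → Int × Int
  | [], r, m => (r, m)
  | ch :: rest, r, m =>
    let r' := if ch = '(' then r + 1 else r - 1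
    minParenthesesLoopB rest r' (if r' < m then r' else m)

def minParentheses_alt (s : String) : Int :=
  let (r, m) := minParenthesesLoopB s.toList 0 0
  r - 2 * m

-- ===== PRECONDITION & SPEC =====
def Spec_minParentheses (s : String) (out : Int) : Prop := out = minParentheses_alt s
instance (s : String) (out : Int) : Decidable (Spec_minParentheses s out) := by unfold Spec_minParentheses; infer_instance

-- ===== CLAIM (what is proved, stated in full; the proofs are below) =====
def Claim_equal_minParentheses : Prop := ∀ (s : String), Dom_minParentheses s → Spec_minParentheses s (minParentheses s)

-- ===== LEMMAS AND PROOFS =====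

theorem minParentheses_loops (l : List Char) : ∀ (r m : Int), m ≤ r →
    (minParenthesesLoopA l (r - m) (-m)).2 + (minParenthesesLoopA l (r - m) (-m)).1
      = (minParenthesesLoopB l r m).1 - 2 * (minParenthesesLoopB l r m).2 := by
  induction l with
  | nil => intro r m h; simp [minParenthesesLoopA, minParenthesesLoopB]; ring
  | cons ch rest ih =>
    intro r m h
    simp only [minParenthesesLoopA, minParenthesesLoopB]
    by_cases hc : ch = '('
    · have hm : ¬ (r + 1 < m) := by omega
      simp only [hc, if_true, if_neg hm]
      have : r - m + 1 = (r + 1) - m := by ring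
      rw [this]
      exact ih (r + 1) m (by omega)
    · rw [if_neg hc, if_neg hc]
      by_cases hb : r - m > 0
      · rw [if_pos hb]
        have hm : ¬ (r - 1 < m) := by omega
        rw [if_neg hm]
        have : r - m - 1 = (r - 1) - m := by ring
        rw [this]
        exact ih (r - 1) m (by omega)
      · rw [if_neg hb]
        have hrm : r = m := by omega
        have hm : r - 1 < m := by omega
        rw [if_pos hm]
        have h1 : r - m = (r - 1) - (r - 1) := by omega
        have h2 : -m + 1 = -(r - 1) := by omega
        rw [h1, h2]
        exact ih (r - 1) (r - 1) le_rfl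

-- ===== VERDICT (by name: the statement is the Claim_ definition above) =====
theorem minParentheses_spec : Claim_equal_minParentheses := by
  intro s _
  unfold Spec_minParentheses minParentheses minParentheses_alt
  have := minParentheses_loops s.toList 0 0 le_rfl
  simpa using this
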